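-- pv_equiv track=rewrite | github.com/sunyang1994702/Algorithm | getShortestUniqueSubstring.py | getShortestUniqueSubstring
-- ===== SOURCE A (Python) =====
-- def getShortestUniqueSubstring(arr, str_):
--     temp = []
--
--     for i in range(0, len(str_)-len(arr) + 1):
--         for j in range(0, len(arr)):
--             if str_[i+j] in arr and not (str_[i+j] in temp):
--                 temp.append(str_[i+j])
--             else:
--                 temp = []
--                 break
--
--         if len(temp) == len(arr):
--             return temp
--             break
-- ===== SOURCE B (Python) =====
-- def getShortestUniqueSubstring(arr, str_):
--     # One pass over str_, maintaining the longest "clean" suffix window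
--     # (distinct chars, all in arr) instead of re-checking every possible start.
--     allowed = set(arr)
--     if len(arr) == 0:
--         return []
--     win = []
--     for ch in str_:
--         if ch not in allowed:
--             win = []
--         else:
--             if ch in win:
--                 win = win[win.index(ch) + 1:]
--             win.append(ch)
--             if len(win) == len(arr):
--                 return win
--     return None
-- ===== Notes on version B (the rewrite author's own statement) =====
-- stated objective: alternative
-- what changed: Replaces the restart-every-start nested scan (each window rebuilt char by char with linear 'in arr'/'in temp' list tests) by a single left-to-right pass that maintains the current clean window (distinct chars, all in a precomputed set) and slides past the previous occurrence on a duplicate.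
import Mathlib
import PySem

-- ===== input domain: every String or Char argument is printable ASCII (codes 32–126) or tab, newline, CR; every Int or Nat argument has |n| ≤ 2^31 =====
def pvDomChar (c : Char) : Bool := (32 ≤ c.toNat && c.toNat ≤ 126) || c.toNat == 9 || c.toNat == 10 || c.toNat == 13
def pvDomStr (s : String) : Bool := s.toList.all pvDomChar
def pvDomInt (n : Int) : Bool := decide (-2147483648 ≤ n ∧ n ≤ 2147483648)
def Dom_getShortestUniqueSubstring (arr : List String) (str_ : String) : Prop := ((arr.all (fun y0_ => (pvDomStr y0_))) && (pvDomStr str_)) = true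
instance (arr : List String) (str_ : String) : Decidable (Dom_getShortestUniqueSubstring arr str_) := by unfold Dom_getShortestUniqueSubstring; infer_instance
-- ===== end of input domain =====

-- B replaces A's restart-every-start nested scan by one left-to-right pass that keeps the
-- current clean window (distinct chars, all in a precomputed set) and slides past the
-- previous occurrence on a duplicate.

-- ===== PORT A =====
-- str_[k] is a 1-character Python string
def pvToS (c : Char) : String := String.ofList [c]

-- 'for j in range(0, len(arr))': returns the new temp ([] models 'temp = []; break')
def pvAInner (arr : List String) (cs : List Char) (i : Int) (temp : List String) : List Int → List String
  | [] => temp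
  | j :: js =>
    match PySem.List.pyGet? cs (i + j) with
    | some c =>
        if arr.contains (pvToS c) && !(temp.contains (pvToS c)) then
          pvAInner arr cs i (temp ++ [pvToS c]) js
        else []
    | none => []   -- IndexError: unreachable (0 ≤ i ≤ len-len(arr), 0 ≤ j < len(arr))

-- 'for i in range(0, len(str_)-len(arr)+1)' threading temp across iterations as A does
def pvAOuter (arr : List String) (cs : List Char) (temp : List String) : List Int → Option (List String)
  | [] => none
  | i :: is =>
    let t := pvAInner arr cs i temp (PySem.List.pyRange 0 (arr.length : Int) 1)
    if t.length = arr.length then some t else pvAOuter arr cs t is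

def getShortestUniqueSubstring (arr : List String) (str_ : String) : Option (List String) :=
  pvAOuter arr str_.toList []
    (PySem.List.pyRange 0 (PySem.Str.len str_ - (arr.length : Int) + 1) 1)

-- ===== PORT B =====
-- the 'for ch in str_' loop of Source B; win is the current clean window
def pvBLoop (arr allowed win : List String) : List Char → Option (List String)
  | [] => none
  | c :: cs =>
    let x := pvToS c
    if !(PySem.Set.contains allowed x) then pvBLoop arr allowed [] cs
    else
      let w1 := if win.contains x then
          -- win[win.index(ch) + 1:]; index is guarded by 'ch in win', so .getD is never taken
          PySem.List.slice win (some (((PySem.List.index? win x).getD 0 : Int) + 1)) none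
        else win
      let w2 := w1 ++ [x]
      if w2.length = arr.length then some w2 else pvBLoop arr allowed w2 cs

def getShortestUniqueSubstring_alt (arr : List String) (str_ : String) : Option (List String) :=
  let allowed := PySem.Set.ofList arr
  if arr.length = 0 then some [] else pvBLoop arr allowed [] str_.toList

-- ===== PRECONDITION & SPEC =====
def Spec_getShortestUniqueSubstring (arr : List String) (str_ : String) (out : Option (List String)) : Prop := out = getShortestUniqueSubstring_alt arr str_
instance (arr : List String) (str_ : String) (out : Option (List String)) : Decidable (Spec_getShortestUniqueSubstring arr str_ out) := by unfold Spec_getShortestUniqueSubstring; infer_instance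

-- ===== CLAIM (what is proved, stated in full; the proofs are below) =====
def Claim_equal_getShortestUniqueSubstring : Prop := ∀ (arr : List String) (str_ : String), Dom_getShortestUniqueSubstring arr str_ → Spec_getShortestUniqueSubstring arr str_ (getShortestUniqueSubstring arr str_)

-- ===== LEMMAS AND PROOFS =====

-- a window is "clean" iff all its chars are in arr and it has no duplicates
def pvCleanB (arr l : List String) : Bool := l.all (fun x => arr.contains x) && decide l.Nodup

def pvWin (arr ss : List String) (s : Nat) : List String := (ss.drop s).take arr.length

-- common specification: the first start s ≥ s0 (s + m ≤ n) whose window is clean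
def pvSpecS (arr ss : List String) (s0 : Nat) : Option (List String) :=
  if ss.length + 1 - arr.length ≤ s0 then none
  else if pvCleanB arr (pvWin arr ss s0) then some (pvWin arr ss s0)
  else pvSpecS arr ss (s0 + 1)
termination_by ss.length + 1 - arr.length - s0
decreasing_by omega

theorem pvCleanB_iff (arr l : List String) :
    pvCleanB arr l = true ↔ (∀ x ∈ l, arr.contains x = true) ∧ l.Nodup := by
  simp [pvCleanB]

theorem pvClean_nil (arr : List String) : pvCleanB arr [] = true := by simp [pvCleanB]

theorem pvSpecS_skip (arr ss : List String) (s0 : Nat)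
    (h : ¬ pvCleanB arr (pvWin arr ss s0) = true) :
    pvSpecS arr ss s0 = pvSpecS arr ss (s0 + 1) := by
  rw [pvSpecS]
  by_cases hb : ss.length + 1 - arr.length ≤ s0
  · rw [if_pos hb, pvSpecS, if_pos (by omega)]
  · rw [if_neg hb, if_neg h]

theorem pvSpecS_none (arr ss : List String) (s0 : Nat)
    (h : ss.length + 1 - arr.length ≤ s0) : pvSpecS arr ss s0 = none := by
  rw [pvSpecS, if_pos h]

theorem pv_contains_false {l : List String} {x : String} :
    l.contains x = false ↔ x ∉ l := by
  rw [List.contains_eq_any_beq]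
  simp only [List.any_eq_false, beq_iff_eq]
  constructor
  · intro h hx
    exact h x hx rfl
  · intro h y hy hxy
    exact h (hxy ▸ hy)

-- window facts
theorem pvWin_length (arr ss : List String) (s : Nat) (h : s + arr.length ≤ ss.length) :
    (pvWin arr ss s).length = arr.length := by
  simp [pvWin]; omega

theorem pvWin_getElem (arr ss : List String) (s j : Nat) (hj : j < arr.length)
    (h : s + arr.length ≤ ss.length) :
    (pvWin arr ss s)[j]'(by rw [pvWin_length arr ss s h]; exact hj) =
      ss[s + j]'(by omega) := by
  simp [pvWin]

theorem pvWin_take_succ (arr ss : List String) (s j : Nat) (hj : j < arr.length)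
    (h : s + arr.length ≤ ss.length) :
    (pvWin arr ss s).take (j + 1) = (pvWin arr ss s).take j ++ [ss[s + j]'(by omega)] := by
  rw [List.take_add_one]
  congr 1
  rw [List.getElem?_eq_getElem (by rw [pvWin_length arr ss s h]; exact hj)]
  rw [pvWin_getElem arr ss s j hj h]
  rfl

theorem pvAInner_eq (arr : List String) (cs : List Char) (s : Nat)
    (hsm : s + arr.length ≤ cs.length) :
    ∀ (k j : Nat), arr.length - j = k → j ≤ arr.length →
    pvCleanB arr ((pvWin arr (cs.map pvToS) s).take j) = true →
    pvAInner arr cs (s : Int) ((pvWin arr (cs.map pvToS) s).take j)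
        (PySem.List.pyRange (j : Int) (arr.length : Int) 1) =
      (if pvCleanB arr (pvWin arr (cs.map pvToS) s) = true then pvWin arr (cs.map pvToS) s else []) := by
  intro k
  induction k with
  | zero =>
    intro j hk hj hcl
    have hjm : j = arr.length := by omega
    subst hjm
    rw [PySem.List.pyRange_one_eq_nil (by omega)]
    have hwl : (pvWin arr (cs.map pvToS) s).length = arr.length :=
      pvWin_length _ _ _ (by simpa using hsm)
    rw [List.take_of_length_le (by omega)] at hcl ⊢
    simp [pvAInner, if_pos hcl]
  | succ k ih =>
    intro j hk hj hcl
    have hjm : j < arr.length := by omega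
    have hss : s + arr.length ≤ (cs.map pvToS).length := by simpa using hsm
    rw [PySem.List.pyRange_one_cons (by exact_mod_cast hjm)]
    show pvAInner arr cs (s : Int) _ (_ :: _) = _
    rw [pvAInner]
    have hidx : (s : Int) + (j : Int) = ((s + j : Nat) : Int) := by push_cast; ring
    have hlt : s + j < cs.length := by omega
    rw [hidx, PySem.List.pyGet?_natCast, List.getElem?_eq_getElem hlt]
    set c := cs[s + j]'hlt with hc
    dsimp only
    have hmapel : (cs.map pvToS)[s + j]'(by simpa using hlt) = pvToS c := by
      rw [List.getElem_map]
    have hwel : (pvWin arr (cs.map pvToS) s)[j]'(by rw [pvWin_length _ _ _ hss]; exact hjm) = pvToS c := by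
      rw [pvWin_getElem arr _ s j hjm hss]; exact hmapel
    by_cases hcond : (arr.contains (pvToS c) && !(((pvWin arr (cs.map pvToS) s).take j).contains (pvToS c))) = true
    · rw [if_pos hcond]
      have hstep : (pvWin arr (cs.map pvToS) s).take j ++ [pvToS c] =
          (pvWin arr (cs.map pvToS) s).take (j + 1) := by
        rw [pvWin_take_succ arr _ s j hjm hss, hmapel]
      rw [hstep]
      have hcl' : pvCleanB arr ((pvWin arr (cs.map pvToS) s).take (j + 1)) = true := by
        rw [← hstep]
        rw [pvCleanB_iff] at hcl ⊢
        simp only [Bool.and_eq_true, Bool.not_eq_true'] at hcond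
        constructor
        · intro x hx
          rcases List.mem_append.mp hx with h | h
          · exact hcl.1 x h
          · simp at h; subst h; exact hcond.1
        · rw [List.nodup_append]
          refine ⟨hcl.2, List.nodup_singleton _, ?_⟩
          intro x hx y hy
          have hye : y = pvToS c := by simpa using hy
          subst hye
          intro hxy
          exact absurd (hxy ▸ hx) (pv_contains_false.mp hcond.2)
      have hpi : ((j : Int) + 1) = ((j + 1 : Nat) : Int) := by omega
      rw [hpi]
      exact ih (j + 1) (by omega) (by omega) hcl'
    · rw [if_neg hcond]
      have hnot : ¬ pvCleanB arr (pvWin arr (cs.map pvToS) s) = true := by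
        intro hfull
        rw [pvCleanB_iff] at hfull
        simp only [Bool.and_eq_true, Bool.not_eq_true'] at hcond
        apply hcond
        constructor
        · exact hfull.1 _ (by
            rw [← hwel]; exact List.getElem_mem _)
        · have hmem : pvToS c ∉ (pvWin arr (cs.map pvToS) s).take j := by
            intro hmem
            have hnd : ((pvWin arr (cs.map pvToS) s).take (j + 1)).Nodup :=
              (List.take_sublist _ _).nodup hfull.2
            rw [pvWin_take_succ arr _ s j hjm hss, hmapel, List.nodup_append] at hnd
            exact hnd.2.2 _ hmem (pvToS c) (by simp) rfl
          exact pv_contains_false.mpr hmem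
      rw [if_neg hnot]

theorem pvAOuter_eq (arr : List String) (cs : List Char) :
    ∀ (k s0 : Nat), (cs.length + 1 - arr.length) - s0 = k →
    pvAOuter arr cs [] (PySem.List.pyRange (s0 : Int) ((cs.length : Int) - (arr.length : Int) + 1) 1) =
      pvSpecS arr (cs.map pvToS) s0 := by
  intro k
  induction k with
  | zero =>
    intro s0 hk
    have hb : cs.length + 1 - arr.length ≤ s0 := by omega
    rw [PySem.List.pyRange_one_eq_nil (by omega)]
    rw [pvAOuter, pvSpecS_none arr _ s0 (by simpa using hb)]
  | succ k ih =>
    intro s0 hk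
    have hsm : s0 + arr.length ≤ cs.length := by omega
    have hss : s0 + arr.length ≤ (cs.map pvToS).length := by simpa using hsm
    have hlen : (cs.map pvToS).length = cs.length := by simp
    rw [PySem.List.pyRange_one_cons (by omega)]
    rw [pvAOuter]
    have hinner := pvAInner_eq arr cs s0 hsm (arr.length - 0) 0 rfl (by omega)
      (by simpa using pvClean_nil arr)
    simp only [List.take_zero, Nat.cast_zero] at hinner
    rw [hinner]
    by_cases hclw : pvCleanB arr (pvWin arr (cs.map pvToS) s0) = true
    · rw [if_pos hclw]
      rw [if_pos (pvWin_length arr _ s0 hss)]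
      rw [pvSpecS, if_neg (by omega), if_pos hclw]
    · rw [if_neg hclw]
      have hm0 : arr.length ≠ 0 := by
        intro h
        apply hclw
        have : pvWin arr (cs.map pvToS) s0 = [] := by simp [pvWin, h]
        rw [this]
        exact pvClean_nil arr
      rw [if_neg (by simp; omega)]
      have hcast : ((s0 : Int) + 1) = ((s0 + 1 : Nat) : Int) := by omega
      rw [hcast, ih (s0 + 1) (by omega)]
      exact (pvSpecS_skip arr _ s0 hclw).symm

theorem pvA_eq_spec (arr : List String) (str_ : String) :
    getShortestUniqueSubstring arr str_ = pvSpecS arr (str_.toList.map pvToS) 0 := by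
  unfold getShortestUniqueSubstring
  have h := pvAOuter_eq arr str_.toList (str_.toList.length + 1 - arr.length) 0 (by omega)
  simp only [Nat.cast_zero] at h
  rw [PySem.Str.len_eq, h]

theorem pv_suffix_concat {t p : List String} {x : String} (h : t <:+ p ++ [x]) :
    t = [] ∨ ∃ t0, t0 <:+ p ∧ t = t0 ++ [x] := by
  rcases List.eq_nil_or_concat t with h0 | ⟨t0, a, ht⟩
  · exact Or.inl h0
  · right
    subst ht
    rcases h with ⟨u, hu⟩
    simp only [List.concat_eq_append, ← List.append_assoc] at hu
    obtain ⟨h1, h2⟩ := List.append_inj' hu (by simp)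
    have ha : a = x := by simpa using h2
    subst ha
    exact ⟨t0, ⟨u, h1⟩, by simp⟩

theorem pv_clean_concat {arr t0 : List String} {x : String}
    (h : pvCleanB arr (t0 ++ [x]) = true) :
    pvCleanB arr t0 = true ∧ arr.contains x = true ∧ x ∉ t0 := by
  rw [pvCleanB_iff] at h
  obtain ⟨hall, hnd⟩ := h
  rw [List.nodup_append] at hnd
  refine ⟨?_, hall x (by simp), ?_⟩
  · rw [pvCleanB_iff]
    exact ⟨fun y hy => hall y (by simp [hy]), hnd.1⟩
  · intro hx
    exact hnd.2.2 x hx x (by simp) rfl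

theorem pv_suffix_append_right {l p : List String} (x : String) (h : l <:+ p) :
    l ++ [x] <:+ p ++ [x] := by
  rcases h with ⟨u, hu⟩
  exact ⟨u, by rw [← hu, List.append_assoc]⟩

theorem pvWin_eq_drop (arr : List String) (q rest : List String) (s0 : Nat)
    (h : s0 + arr.length = q.length) :
    pvWin arr (q ++ rest) s0 = q.drop s0 := by
  unfold pvWin
  rw [List.drop_append_of_le_length (by omega), List.take_append]
  have hdl : (q.drop s0).length = arr.length := by simp; omega
  rw [List.take_of_length_le (by rw [hdl]), hdl, Nat.sub_self, List.take_zero, List.append_nil]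

theorem pv_contains_true {l : List String} {x : String} :
    l.contains x = true ↔ x ∈ l := by
  rw [List.contains_eq_any_beq]
  simp only [List.any_eq_true, beq_iff_eq]
  constructor
  · rintro ⟨y, hy, rfl⟩; exact hy
  · intro h; exact ⟨x, h, rfl⟩

theorem pvBLoop_eq (arr : List String) (hm : 1 ≤ arr.length) :
    ∀ (cr : List Char) (p win : List String),
      pvCleanB arr win = true →
      win <:+ p →
      win.length < arr.length →
      (∀ t, pvCleanB arr t = true → t <:+ p → t <:+ win) →
      pvBLoop arr (PySem.Set.ofList arr) win cr =
        pvSpecS arr (p ++ cr.map pvToS) (p.length + 1 - arr.length) := by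
  intro cr
  induction cr with
  | nil =>
    intro p win hcl hsuf hlen hmax
    rw [pvBLoop]
    simp only [List.map_nil, List.append_nil]
    exact (pvSpecS_none arr p _ (le_refl _)).symm
  | cons c cr ih =>
    intro p win hcl hsuf hlen hmax
    rw [pvBLoop]
    dsimp only
    conv_rhs => rw [List.map_cons, List.append_cons]
    by_cases hxarr : pvToS c ∈ arr
    case neg =>
      -- ch not in allowed: reset win
      have hc : PySem.Set.contains (PySem.Set.ofList arr) (pvToS c) = false := by
        rw [← Bool.not_eq_true, PySem.Set.contains_iff, PySem.Set.mem_ofList]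
        exact hxarr
      rw [if_pos (by rw [hc]; rfl)]
      have hmax0 : ∀ t, pvCleanB arr t = true → t <:+ p ++ [pvToS c] → t <:+ ([] : List String) := by
        intro t hct hst
        rcases pv_suffix_concat hst with rfl | ⟨t0, hst0, rfl⟩
        · exact List.nil_suffix
        · exact absurd (pv_contains_true.mp (pv_clean_concat hct).2.1) hxarr
      have hrec := ih (p ++ [pvToS c]) [] (by simp [pvCleanB]) List.nil_suffix (by simp only [List.length_nil]; omega) hmax0
      rw [hrec]
      simp only [List.length_append, List.length_cons, List.length_nil]
      by_cases hmp : arr.length ≤ p.length + 1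
      · have hnc : ¬ pvCleanB arr (pvWin arr ((p ++ [pvToS c]) ++ cr.map pvToS) (p.length + 1 - arr.length)) = true := by
          rw [pvWin_eq_drop arr _ _ _ (by simp; omega)]
          intro hcln
          rw [pvCleanB_iff] at hcln
          have hx : pvToS c ∈ (p ++ [pvToS c]).drop (p.length + 1 - arr.length) := by
            rw [List.drop_append_of_le_length (by omega)]
            simp
          exact hxarr (pv_contains_true.mp (hcln.1 _ hx))
        rw [show p.length + 0 + 1 + 1 - arr.length = (p.length + 1 - arr.length) + 1 by omega]
        exact (pvSpecS_skip arr _ _ hnc).symm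
      · rw [show p.length + 0 + 1 + 1 - arr.length = p.length + 1 - arr.length by omega]
    case pos =>
      have hc : PySem.Set.contains (PySem.Set.ofList arr) (pvToS c) = true := by
        rw [PySem.Set.contains_iff, PySem.Set.mem_ofList]; exact hxarr
      rw [if_neg (by rw [hc]; simp)]
      -- characterize w1
      obtain ⟨w1, hW1, hw1suf, hxnot, hmax1⟩ :
          ∃ w1, (if win.contains (pvToS c) then
                  PySem.List.slice win (some (((PySem.List.index? win (pvToS c)).getD 0 : Int) + 1)) none
                else win) = w1 ∧
            w1 <:+ win ∧ pvToS c ∉ w1 ∧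
            (∀ t0, pvCleanB arr t0 = true → t0 <:+ p → pvToS c ∉ t0 → t0 <:+ w1) := by
        by_cases hxw : pvToS c ∈ win
        · have hwc : win.contains (pvToS c) = true := pv_contains_true.mpr hxw
          have hsome : (PySem.List.index? win (pvToS c)).isSome = true :=
            (PySem.List.index?_isSome_iff win (pvToS c)).mpr hxw
          obtain ⟨idx, hidx⟩ := Option.isSome_iff_exists.mp hsome
          obtain ⟨hik, hieq, hifirst⟩ := PySem.List.getElem_of_index?_eq_some hidx
          refine ⟨win.drop (idx + 1), ?_, List.drop_suffix _ _, ?_, ?_⟩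
          · rw [if_pos hwc, hidx]
            show PySem.List.slice win (some ((idx : Int) + 1)) none = _
            rw [show ((idx : Int) + 1) = (((idx + 1 : Nat)) : Int) by push_cast; ring]
            exact PySem.List.slice_from_natCast win (idx + 1)
          · -- x not in win.drop (idx+1) since win is nodup
            intro hmem
            obtain ⟨j, hj, hje⟩ := List.mem_iff_getElem.mp hmem
            rw [List.getElem_drop] at hje
            have hnd : win.Nodup := (pvCleanB_iff arr win).mp hcl |>.2
            have := (List.Nodup.getElem_inj_iff hnd).mp (hje.trans hieq.symm)
            omega
          · intro t0 hct0 hst0 hxt0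
            have hsw : t0 <:+ win := hmax t0 hct0 hst0
            have ht0d : t0 = win.drop (win.length - t0.length) := List.suffix_iff_eq_drop.mp hsw
            set a := win.length - t0.length with ha
            by_cases hai : idx + 1 ≤ a
            · rw [ht0d, show a = idx + 1 + (a - (idx + 1)) by omega, ← List.drop_drop]
              exact List.drop_suffix _ _
            · exfalso
              apply hxt0
              rw [ht0d]
              refine List.mem_iff_getElem.mpr ⟨idx - a, by simp; omega, ?_⟩
              rw [List.getElem_drop]
              exact (getElem_congr rfl (show a + (idx - a) = idx by omega) (by omega)).trans hieq
        · refine ⟨win, if_neg (by rw [pv_contains_true]; exact hxw), List.suffix_refl _, hxw, ?_⟩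
          intro t0 hct0 hst0 _
          exact hmax t0 hct0 hst0
      rw [hW1]
      -- invariants for w2 = w1 ++ [x]
      have hclw : pvCleanB arr win = true := hcl
      obtain ⟨hallw, hndw⟩ := (pvCleanB_iff arr win).mp hclw
      have hclean2 : pvCleanB arr (w1 ++ [pvToS c]) = true := by
        rw [pvCleanB_iff]
        constructor
        · intro y hy
          rcases List.mem_append.mp hy with h | h
          · exact hallw y (hw1suf.sublist.mem h)
          · simp at h; subst h; exact pv_contains_true.mpr hxarr
        · rw [List.nodup_append]
          refine ⟨hw1suf.sublist.nodup hndw, List.nodup_singleton _, ?_⟩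
          intro y hy z hz
          have : z = pvToS c := by simpa using hz
          subst this
          intro hyz
          exact hxnot (hyz ▸ hy)
      have hw1p : w1 <:+ p := hw1suf.trans hsuf
      have hsuf2 : w1 ++ [pvToS c] <:+ p ++ [pvToS c] := pv_suffix_append_right _ hw1p
      have hlen2 : (w1 ++ [pvToS c]).length ≤ arr.length := by
        have := hw1suf.length_le
        simp only [List.length_append, List.length_cons, List.length_nil]
        omega
      have hmax2 : ∀ t, pvCleanB arr t = true → t <:+ p ++ [pvToS c] → t <:+ w1 ++ [pvToS c] := by
        intro t hct hst
        rcases pv_suffix_concat hst with rfl | ⟨t0, hst0, rfl⟩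
        · exact List.nil_suffix
        · obtain ⟨hct0, _, hxt0⟩ := pv_clean_concat hct
          exact pv_suffix_append_right _ (hmax1 t0 hct0 hst0 hxt0)
      by_cases hfull : (w1 ++ [pvToS c]).length = arr.length
      · rw [if_pos hfull]
        have hple : arr.length ≤ p.length + 1 := by
          have h1 := hsuf2.length_le
          have h2 := hfull
          simp only [List.length_append, List.length_cons, List.length_nil] at h1 h2
          omega
        have hwin : pvWin arr ((p ++ [pvToS c]) ++ cr.map pvToS) (p.length + 1 - arr.length) =
            w1 ++ [pvToS c] := by
          rw [pvWin_eq_drop arr _ _ _ (by simp; omega)]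
          have h1 : w1 ++ [pvToS c] = (p ++ [pvToS c]).drop ((p ++ [pvToS c]).length - (w1 ++ [pvToS c]).length) :=
            List.suffix_iff_eq_drop.mp hsuf2
          rw [h1]
          congr 1
          have h2 := hfull
          simp only [List.length_append, List.length_cons, List.length_nil] at h2 ⊢
          omega
        rw [pvSpecS, if_neg (by simp only [List.length_append, List.length_cons, List.length_nil]; omega),
          hwin, if_pos hclean2]
      · rw [if_neg hfull]
        have hrec := ih (p ++ [pvToS c]) (w1 ++ [pvToS c]) hclean2 hsuf2 (by omega) hmax2
        rw [hrec]
        simp only [List.length_append, List.length_cons, List.length_nil]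
        by_cases hmp : arr.length ≤ p.length + 1
        · have hnc : ¬ pvCleanB arr (pvWin arr ((p ++ [pvToS c]) ++ cr.map pvToS) (p.length + 1 - arr.length)) = true := by
            rw [pvWin_eq_drop arr _ _ _ (by simp; omega)]
            intro hcln
            have hsufw : (p ++ [pvToS c]).drop (p.length + 1 - arr.length) <:+ p ++ [pvToS c] :=
              List.drop_suffix _ _
            have := hmax2 _ hcln hsufw
            have hL := this.length_le
            have hdl : ((p ++ [pvToS c]).drop (p.length + 1 - arr.length)).length = arr.length := by
              simp only [List.length_drop, List.length_append, List.length_cons, List.length_nil]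
              omega
            simp only [List.length_append, List.length_cons, List.length_nil] at hL hdl hfull hlen2
            omega
          rw [show p.length + 1 + 1 - arr.length = (p.length + 1 - arr.length) + 1 by omega]
          exact (pvSpecS_skip arr _ _ hnc).symm
        · rw [show p.length + 1 + 1 - arr.length = p.length + 1 - arr.length by omega]

theorem pvB_eq_spec (arr : List String) (str_ : String) :
    getShortestUniqueSubstring_alt arr str_ = pvSpecS arr (str_.toList.map pvToS) 0 := by
  unfold getShortestUniqueSubstring_alt
  dsimp only
  by_cases hm : arr.length = 0
  · rw [if_pos hm, pvSpecS]
    have hwin : pvWin arr (str_.toList.map pvToS) 0 = [] := by simp [pvWin, hm]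
    rw [if_neg (by simp; omega), hwin, if_pos (pvClean_nil arr)]
  · rw [if_neg hm]
    have h := pvBLoop_eq arr (by omega) str_.toList [] []
      (pvClean_nil arr) (List.suffix_refl _) (by simp only [List.length_nil]; omega)
      (fun t _ ht => ht)
    rw [h]
    simp only [List.nil_append, List.length_nil]
    rw [show 0 + 1 - arr.length = 0 by omega]

-- ===== VERDICT (by name: the statement is the Claim_ definition above) =====
theorem getShortestUniqueSubstring_spec : Claim_equal_getShortestUniqueSubstring := by
  intro arr str_ _
  unfold Spec_getShortestUniqueSubstring
  rw [pvA_eq_spec, pvB_eq_spec]
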